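-- pv_equiv track=rewrite | github.com/ajakaiye33/pybites_code_challenge | pybites_codes/lstrip.py | lystrip
-- ===== SOURCE A (Python) =====
-- def lystrip(iterable, strip_value):
--     '''
--     remove iterable with strip_value items remove from begining
--     '''
--     striped = []
--     is_begining = True
--     for item in iterable:
--         if is_begining and item == strip_value:
--             continue
--         is_begining = False
--         striped.append(item)
--     return striped
-- ===== SOURCE B (Python) =====
-- def lystrip(iterable, strip_value):
--     items = list(iterable)
--     start = 0
--     while start < len(items) and items[start] == strip_value:
--         start += 1
--     return items[start:]
-- ===== Notes on version B (the rewrite author's own statement) =====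
-- stated objective: idiomatic
-- what changed: B materializes the input, advances a boundary index past leading strip_value items with a while loop, and returns one slice, instead of A's element-by-element append behind an is_begining flag.
import Mathlib
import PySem

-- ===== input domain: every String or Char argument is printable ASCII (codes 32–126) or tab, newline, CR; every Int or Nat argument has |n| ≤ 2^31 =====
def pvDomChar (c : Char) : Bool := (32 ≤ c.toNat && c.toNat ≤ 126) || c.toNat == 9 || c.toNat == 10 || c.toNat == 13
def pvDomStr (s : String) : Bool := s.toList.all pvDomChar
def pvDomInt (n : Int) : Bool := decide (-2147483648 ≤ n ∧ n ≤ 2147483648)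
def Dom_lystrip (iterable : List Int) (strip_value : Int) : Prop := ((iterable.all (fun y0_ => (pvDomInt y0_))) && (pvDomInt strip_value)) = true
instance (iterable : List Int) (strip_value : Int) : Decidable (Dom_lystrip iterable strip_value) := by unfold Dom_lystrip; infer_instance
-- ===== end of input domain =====

-- B indexes past leading strip_value items and returns one slice instead of A's append-behind-a-flag loop (idiomatic).

-- ===== PORT A =====
-- for item in iterable: if is_begining and item == strip_value: continue; is_begining = False; striped.append(item)
def lystrip (iterable : List Int) (strip_value : Int) : List Int :=
  (iterable.foldl
    (fun (st : List Int × Bool) item =>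
      if st.2 && (item == strip_value) then st
      else (st.1 ++ [item], false))
    ([], true)).1

-- ===== PORT B =====
-- while start < len(items) and items[start] == strip_value: start += 1
def lystripAltStart (items : List Int) (strip_value : Int) (start : Nat) : Nat :=
  if h : start < items.length ∧ items[start]! == strip_value then
    lystripAltStart items strip_value (start + 1)
  else start
termination_by items.length - start
decreasing_by omega

-- return items[start:]
def lystrip_alt (iterable : List Int) (strip_value : Int) : List Int :=
  PySem.List.slice iterable (some (lystripAltStart iterable strip_value 0 : Int)) none

-- ===== PRECONDITION & SPEC =====
def Spec_lystrip (iterable : List Int) (strip_value : Int) (out : List Int) : Prop := out = lystrip_alt iterable strip_value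
instance (iterable : List Int) (strip_value : Int) (out : List Int) : Decidable (Spec_lystrip iterable strip_value out) := by unfold Spec_lystrip; infer_instance

-- ===== CLAIM (what is proved, stated in full; the proofs are below) =====
def Claim_equal_lystrip : Prop := ∀ (iterable : List Int) (strip_value : Int), Dom_lystrip iterable strip_value → Spec_lystrip iterable strip_value (lystrip iterable strip_value)

-- ===== LEMMAS AND PROOFS =====

-- Once is_begining is false, A's fold just appends every remaining item.
theorem lystrip_fold_false (l : List Int) (v : Int) (acc : List Int) :
    l.foldl
      (fun (st : List Int × Bool) item =>
        if st.2 && (item == v) then st else (st.1 ++ [item], false))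
      (acc, false) = (acc ++ l, false) := by
  induction l generalizing acc with
  | nil => simp
  | cons x xs ih =>
    rw [List.foldl_cons]
    show List.foldl _ (acc ++ [x], false) xs = _
    rw [ih (acc ++ [x])]
    simp

-- A computes dropWhile (· == v).
theorem lystrip_eq_dropWhile (l : List Int) (v : Int) :
    lystrip l v = l.dropWhile (fun x => x == v) := by
  unfold lystrip
  induction l with
  | nil => rfl
  | cons x xs ih =>
    rw [List.foldl_cons]
    by_cases h : x = v
    · rw [if_pos (show ((((([] : List Int)), true).2 && (x == v)) = true) by simp [h])]
      rw [ih, List.dropWhile_cons]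
      simp [h]
    · rw [if_neg (show ¬ ((((([] : List Int)), true).2 && (x == v)) = true) by simp [h])]
      rw [show (((([] : List Int)), true).1 ++ [x]) = [x] from rfl, lystrip_fold_false, List.dropWhile_cons]
      simp [h]

-- B's index loop, started at i on l, drops exactly over dropWhile of the remaining suffix.
theorem lystripAltStart_drop (l : List Int) (v : Int) (i : Nat) :
    l.drop (lystripAltStart l v i) = (l.drop i).dropWhile (fun x => x == v) := by
  rw [lystripAltStart]
  by_cases h : i < l.length ∧ l[i]! == v
  · simp only [dif_pos h]
    have hi : i < l.length := h.1
    have hd : l.drop i = l[i] :: l.drop (i + 1) := List.drop_eq_getElem_cons hi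
    rw [lystripAltStart_drop l v (i + 1), hd, List.dropWhile]
    have : l[i] == v := by
      have := h.2; rwa [List.getElem!_eq_getElem?_getD, List.getElem?_eq_getElem hi] at this
    simp [this]
  · simp only [dif_neg h]
    by_cases hi : i < l.length
    · have : ¬ (l[i]! == v) := fun hc => h ⟨hi, hc⟩
      have hd : l.drop i = l[i] :: l.drop (i + 1) := List.drop_eq_getElem_cons hi
      rw [hd, List.dropWhile]
      have : ¬ (l[i] == v) := by
        rwa [List.getElem!_eq_getElem?_getD, List.getElem?_eq_getElem hi] at this
      simp [this]
    · simp [List.drop_eq_nil_of_le (show l.length ≤ i by omega)]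
termination_by l.length - i
decreasing_by omega

theorem lystrip_alt_eq_dropWhile (l : List Int) (v : Int) :
    lystrip_alt l v = l.dropWhile (fun x => x == v) := by
  unfold lystrip_alt
  rw [PySem.List.slice_from_natCast]
  have := lystripAltStart_drop l v 0
  simpa using this

-- ===== VERDICT (by name: the statement is the Claim_ definition above) =====
theorem lystrip_spec : Claim_equal_lystrip := by
  intro l v _
  unfold Spec_lystrip
  rw [lystrip_eq_dropWhile, lystrip_alt_eq_dropWhile]
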